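-- pv_equiv track=rewrite | github.com/keisukefukuda/comp-algos | main.py | build_pmf
-- ===== SOURCE A (Python) =====
-- def build_pmf(num_symbols: int, M: int) -> list[int]:
--     """シンボル0を稀少（頻度1）、残りを均等に配分したPMFを構築する"""
--     F = [0] * num_symbols
--     F[0] = 1
--     for i in range(1, num_symbols):
--         F[i] = (M - 1) // (num_symbols - 1)
--     while sum(F) < M:
--         F[-1] += 1
--     F[1] += M - sum(F)
--     return F
-- ===== SOURCE B (Python) =====
-- def build_pmf(num_symbols: int, M: int) -> list[int]:
--     """Closed form: symbol 0 gets frequency 1, the other symbols each get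
--     (M-1)//(num_symbols-1), and the division remainder goes to the last one."""
--     q, r = divmod(M - 1, num_symbols - 1)
--     return [1] + [q] * (num_symbols - 2) + [q + r]
-- ===== Notes on version B (the rewrite author's own statement) =====
-- stated objective: faster
-- what changed: Replaced the fill loop plus the sum-and-increment while loop by a single divmod: quotient fills the tail, remainder is added to the last element in the returned closed-form list.
import Mathlib
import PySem

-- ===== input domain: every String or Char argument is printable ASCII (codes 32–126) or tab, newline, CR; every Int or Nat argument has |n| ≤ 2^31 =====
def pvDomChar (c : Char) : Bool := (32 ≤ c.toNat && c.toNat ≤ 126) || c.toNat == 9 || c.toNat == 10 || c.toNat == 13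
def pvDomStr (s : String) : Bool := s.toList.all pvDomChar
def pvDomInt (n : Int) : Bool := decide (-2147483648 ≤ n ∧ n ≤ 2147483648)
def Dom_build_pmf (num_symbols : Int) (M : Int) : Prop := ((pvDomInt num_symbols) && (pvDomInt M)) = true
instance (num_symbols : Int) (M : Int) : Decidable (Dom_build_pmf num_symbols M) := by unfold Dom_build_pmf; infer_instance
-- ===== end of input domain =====

-- B replaces A's fill loop and O(n^2) sum-and-bump while loop by a single divmod closed form.


-- ===== PORT A =====
-- while sum(F) < M: F[-1] += 1   — under Pre_ each iteration adds 1 to sum(F), so the loop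
-- runs exactly (M - sum F).toNat times; that count is passed as fuel (a totality guard only).
def buildWhile (fuel : Nat) (F : List Int) (M : Int) : List Int :=
  match fuel with
  | 0 => F
  | fuel + 1 =>
      if F.sum < M then
        buildWhile fuel (PySem.List.pySetD F (-1) (PySem.List.pyGetD F (-1) 0 + 1)) M
      else F

def build_pmf (num_symbols : Int) (M : Int) : List Int :=
  let F := PySem.List.pyRepeat [(0 : Int)] num_symbols
  let F := PySem.List.pySetD F 0 1
  let F := (PySem.List.pyRange 1 num_symbols 1).foldl
      (fun F i => PySem.List.pySetD F i (PySem.Int.floordiv (M - 1) (num_symbols - 1))) F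
  let F := buildWhile (M - F.sum).toNat F M
  PySem.List.pySetD F 1 (PySem.List.pyGetD F 1 0 + (M - F.sum))

-- ===== PORT B =====
-- q, r = divmod(M - 1, num_symbols - 1): exact under Pre_ (2 ≤ num_symbols, divisor positive;
-- Python raises ZeroDivisionError only at num_symbols = 1, excluded by Pre_).
def build_pmf_alt (num_symbols : Int) (M : Int) : List Int :=
  let q := PySem.Int.floordiv (M - 1) (num_symbols - 1)
  let r := PySem.Int.mod (M - 1) (num_symbols - 1)
  [1] ++ List.replicate (num_symbols - 2).toNat q ++ [q + r]

-- ===== PRECONDITION & SPEC =====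
-- A raises IndexError whenever num_symbols ≤ 1 (F[0] on [], F[-1] or the final F[1] on a
-- too-short list), so exactly those inputs are excluded.
def Pre_build_pmf (num_symbols : Int) (_M : Int) : Prop := 2 ≤ num_symbols
instance (num_symbols : Int) (M : Int) : Decidable (Pre_build_pmf num_symbols M) := by
  unfold Pre_build_pmf; infer_instance
def pvWitness_build_pmf : Int × Int := (5, 17)

def Spec_build_pmf (num_symbols : Int) (M : Int) (out : List Int) : Prop := out = build_pmf_alt num_symbols M
instance (num_symbols : Int) (M : Int) (out : List Int) : Decidable (Spec_build_pmf num_symbols M out) := by unfold Spec_build_pmf; infer_instance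

-- ===== CLAIM (what is proved, stated in full; the proofs are below) =====
def Claim_equal_build_pmf : Prop := ∀ (num_symbols : Int) (M : Int), Dom_build_pmf num_symbols M → Pre_build_pmf num_symbols M → Spec_build_pmf num_symbols M (build_pmf num_symbols M)

-- ===== LEMMAS AND PROOFS =====

-- Writing F[-1] = v on a list presented as G ++ [x] replaces x by v.
lemma pySetD_neg_one_append (G : List Int) (x v : Int) :
    PySem.List.pySetD (G ++ [x]) (-1) v = G ++ [v] := by
  simp [PySem.List.pySetD, PySem.List.pySet?, PySem.List.pyIdx?]

-- The fill loop: F[i] = q for i in range(a, b) overwrites positions a … b-1 of F.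
lemma foldl_set_range (q : Int) :
    ∀ (c : Nat) (a : Nat) (b : Int) (L : List Int), (b - a).toNat = c → (a : Int) ≤ b →
      b ≤ L.length →
      (PySem.List.pyRange (a : Int) b 1).foldl (fun F i => PySem.List.pySetD F i q) L
        = L.take a ++ List.replicate c q ++ L.drop b.toNat := by
  intro c
  induction c with
  | zero =>
    intro a b L hc ha hb
    have hba : b = (a : Int) := by omega
    subst hba
    rw [PySem.List.pyRange_one_eq_nil le_rfl]
    simp
  | succ c ih =>
    intro a b L hc ha hb
    have hab : (a : Int) < b := by omega
    have haL : a < L.length := by omega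
    rw [PySem.List.pyRange_one_cons hab]
    simp only [List.foldl_cons, PySem.List.pySetD_natCast]
    have hcast : ((a : Int) + 1) = ((a + 1 : Nat) : Int) := by push_cast; ring
    rw [hcast, ih (a + 1) b (L.set a q) (by omega) (by push_cast; omega)
      (by rw [List.length_set]; omega)]
    rw [List.set_eq_take_append_cons_drop, if_pos haL]
    have hta : (L.take a).length = a := by simp; omega
    have hb1 : a + 1 ≤ b.toNat := by omega
    rw [List.take_append, List.drop_append, hta]
    simp only [Nat.add_sub_cancel_left]
    have h1 : (q :: L.drop (a + 1)).take 1 = [q] := rfl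
    have h2 : (q :: L.drop (a + 1)).drop (b.toNat - a) = L.drop b.toNat := by
      have : b.toNat - a = (b.toNat - a - 1) + 1 := by omega
      rw [this]
      simp [List.drop_drop]
      congr 1
      omega
    rw [h2]
    have h3 : (L.take a).take (a + 1) = L.take a := by
      rw [List.take_take]; congr 1; omega
    have h4 : (L.take a).drop b.toNat = [] := by
      rw [List.drop_eq_nil_iff]; omega
    rw [h3, h4, h1]
    simp [List.replicate_succ]

-- The while loop, run with fuel = the deficit, adds the deficit to the last element.
lemma buildWhile_add :
    ∀ (c : Nat) (G : List Int) (x : Int) (M : Int), (G ++ [x]).sum + c = M →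
      buildWhile c (G ++ [x]) M = G ++ [x + c] := by
  intro c
  induction c with
  | zero => intro G x M h; simp [buildWhile]
  | succ c ih =>
    intro G x M h
    have hlt : (G ++ [x]).sum < M := by omega
    rw [buildWhile, if_pos hlt, PySem.List.pyGetD_neg_one_append_singleton,
      pySetD_neg_one_append]
    rw [ih G (x + 1) M (by simp [List.sum_append] at h ⊢; omega)]
    congr 1
    push_cast
    ring_nf

-- ===== VERDICT (by name: the statement is the Claim_ definition above) =====
theorem build_pmf_spec : Claim_equal_build_pmf := by
  intro n M _dom hpre
  unfold Pre_build_pmf at hpre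
  unfold Spec_build_pmf
  show build_pmf n M = build_pmf_alt n M
  simp only [build_pmf, build_pmf_alt]
  set q := PySem.Int.floordiv (M - 1) (n - 1) with hq
  set r := PySem.Int.mod (M - 1) (n - 1) with hr
  have hn1 : (0 : Int) < n - 1 := by omega
  have hr0 : 0 ≤ r := PySem.Int.mod_nonneg _ hn1
  have hrlt : r < n - 1 := PySem.Int.mod_lt _ hn1
  have hqr : q * (n - 1) + r = M - 1 := PySem.Int.floordiv_mul_add_mod _ _
  set k := (n - 1).toNat with hkdef
  have hk1 : 1 ≤ k := by omega
  have hkn : (k : Int) = n - 1 := by omega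
  -- step 1: [0] * n then F[0] = 1
  have h1 : PySem.List.pySetD (PySem.List.pyRepeat [(0 : Int)] n) 0 1
      = 1 :: List.replicate k 0 := by
    rw [PySem.List.pyRepeat_singleton]
    rw [PySem.List.pySetD_of_nonneg _ 1 le_rfl]
    have : n.toNat = k + 1 := by omega
    rw [this, List.replicate_succ]
    rfl
  rw [h1]
  -- step 2: the fill loop
  have h2 := foldl_set_range q k 1 n (1 :: List.replicate k 0) (by omega) (by omega)
      (by simp [List.length_replicate]; omega)
  have hdrop : ((1:Int) :: List.replicate k (0:Int)).drop n.toNat = [] := by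
    rw [List.drop_eq_nil_iff]; simp; omega
  rw [hdrop] at h2
  norm_num at h2
  rw [h2]
  -- step 3: sum after the fill loop
  have hsum1 : (1 :: List.replicate k q).sum = 1 + (n - 1) * q := by
    simp only [List.sum_cons, List.sum_replicate, Int.nsmul_eq_mul, hkn]
  have hdef : M - (1 :: List.replicate k q).sum = r := by rw [hsum1]; linear_combination -hqr
  rw [hdef]
  -- step 4: the while loop
  have hsplit : (1 : Int) :: List.replicate k q
      = (1 :: List.replicate (k - 1) q) ++ [q] := by
    have : k = (k - 1) + 1 := by omega
    rw [this, List.replicate_succ']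
    simp [List.cons_append]
  rw [hsplit]
  have h4 : buildWhile r.toNat ((1 :: List.replicate (k - 1) q) ++ [q]) M
      = (1 :: List.replicate (k - 1) q) ++ [q + r] := by
    rw [buildWhile_add r.toNat _ _ _ (by
      simp only [List.sum_append, List.sum_cons, List.sum_replicate, Int.nsmul_eq_mul,
        List.sum_nil]
      have : ((k - 1 : Nat) : Int) = n - 2 := by omega
      rw [this]
      have : (r.toNat : Int) = r := by omega
      rw [this]
      linear_combination hqr)]
    congr 2
    omega
  rw [h4]
  -- step 5: F[1] += M - sum(F) with the sum now M
  set F := (1 :: List.replicate (k - 1) q) ++ [q + r] with hF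
  have hlen : 1 < F.length := by simp [hF]
  have hsum2 : F.sum = M := by
    simp only [hF, List.sum_append, List.sum_cons, List.sum_replicate, Int.nsmul_eq_mul,
      List.sum_nil]
    have : ((k - 1 : Nat) : Int) = n - 2 := by omega
    rw [this]
    linear_combination hqr
  rw [hsum2, sub_self]
  rw [PySem.List.pySetD_of_nonneg F _ (by norm_num), PySem.List.pyGetD_eq_getElem F 0 (by norm_num)
    (by exact_mod_cast hlen)]
  have hnk : (n - 2).toNat = k - 1 := by omega
  rw [add_zero]
  simp only [Int.toNat_one]
  rw [List.set_getElem_self hlen, hnk, hF]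
  simp
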